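-- pv_equiv track=rewrite | github.com/pratik0157-hub/Going-Merry | Practice_set/33.Happy_num_range.py | happy_num
-- ===== SOURCE A (Python) =====
-- def happy_num(start, end):
--     num_list = []
--     for num in range(start,end+1):
--         history = []
--         orignal = num
--         while num != 1 and num not in history:
--             history.append(num)
--
--             dummy = num
--             sum = 0
--             while dummy>0:
--                 digit = dummy%10
--                 sum+= digit**2
--                 dummy //= 10
--
--             num = sum
--         if num == 1:
--             num_list.append(orignal)
--     return num_list
-- ===== SOURCE B (Python) =====
-- def happy_num(start, end):
--     def sq(n):
--         s = 0
--         while n > 0: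
--             s += (n % 10) ** 2
--             n //= 10
--         return s
--
--     cache = {1: True}
--     result = []
--     for num in range(start, end + 1):
--         n = num
--         seen = set()
--         chain = []
--         while n not in cache and n not in seen:
--             seen.add(n)
--             chain.append(n)
--             n = sq(n)
--         happy = cache.get(n, False)
--         for m in chain:
--             cache[m] = happy
--         if happy:
--             result.append(num)
--     return result
-- ===== Notes on version B (the rewrite author's own statement) =====
-- stated objective: faster
-- what changed: B memoizes happy/unhappy verdicts in a dict shared across all numbers in the range (each walk stops at the first cached value and back-fills its whole chain) and detects cycles with a set instead of scanning a growing history list.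
import Mathlib
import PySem

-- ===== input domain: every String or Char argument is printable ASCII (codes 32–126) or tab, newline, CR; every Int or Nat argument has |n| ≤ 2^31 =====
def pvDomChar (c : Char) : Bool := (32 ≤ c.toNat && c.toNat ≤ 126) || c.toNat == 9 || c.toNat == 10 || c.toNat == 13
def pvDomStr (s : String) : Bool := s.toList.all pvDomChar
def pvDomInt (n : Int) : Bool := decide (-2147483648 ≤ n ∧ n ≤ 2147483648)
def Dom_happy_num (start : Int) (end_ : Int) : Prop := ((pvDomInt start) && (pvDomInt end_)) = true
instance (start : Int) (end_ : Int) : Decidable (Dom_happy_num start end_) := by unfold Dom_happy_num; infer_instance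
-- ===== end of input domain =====

-- B replaces A's per-number history-list walk by a happiness cache shared across the whole
-- range (each chain stops at the first cached value and is back-filled) with set-based cycle
-- detection, intended to be faster by a constant factor.


-- ===== PORT A =====
-- inner 'while dummy > 0' digit-square-sum loop (identical in both Pythons); the Nat fuel
-- 'dummy.toNat' only makes the recursion structural — it never runs out (dummy//10 shrinks toNat)
def sqsumGo : Nat → Int → Int → Int
  | 0, _, s => s
  | f+1, dummy, s =>
    if 0 < dummy then sqsumGo f (PySem.Int.floordiv dummy 10) (s + PySem.Int.mod dummy 10 ^ 2)
    else s

def sqsum (dummy s : Int) : Int := sqsumGo dummy.toNat dummy s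

-- outer 'while num != 1 and num not in history' loop of A; fuel 1000 is a totality guard only
-- (the chain values repeat within 813 steps on the stated domain, proved below)
def loopA : Nat → Int → List Int → Int
  | 0, num, _ => num
  | f+1, num, history =>
    if num ≠ 1 ∧ num ∉ history then loopA f (sqsum num 0) (history ++ [num])
    else num

def happy_num (start : Int) (end_ : Int) : List Int :=
  (PySem.List.pyRange start (end_ + 1) 1).foldl
    (fun num_list num => if loopA 1000 num [] = 1 then num_list ++ [num] else num_list) []

-- ===== PORT B =====
-- 'while n not in cache and n not in seen' walk; returns (n, seen, chain); fuel as in loopA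
def loopB : Nat → Int → PySem.Dict Int Bool → PySem.Set Int → List Int →
    Int × PySem.Set Int × List Int
  | 0, n, _, seen, chain => (n, seen, chain)
  | f+1, n, cache, seen, chain =>
    if cache.contains n = false ∧ PySem.Set.contains seen n = false then
      loopB f (sqsum n 0) cache (PySem.Set.add seen n) (chain ++ [n])
    else (n, seen, chain)

def happy_num_alt (start : Int) (end_ : Int) : List Int :=
  ((PySem.List.pyRange start (end_ + 1) 1).foldl
    (fun (st : PySem.Dict Int Bool × List Int) num =>
      let res := loopB 1000 num st.1 PySem.Set.empty []
      let happy := st.1.getD res.1 false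
      let cache := res.2.2.foldl (fun c m => c.insert m happy) st.1
      (cache, if happy then st.2 ++ [num] else st.2))
    (PySem.Dict.empty.insert 1 true, [])).2

-- ===== PRECONDITION & SPEC =====
def Spec_happy_num (start : Int) (end_ : Int) (out : List Int) : Prop := out = happy_num_alt start end_
instance (start : Int) (end_ : Int) (out : List Int) : Decidable (Spec_happy_num start end_ out) := by unfold Spec_happy_num; infer_instance

-- ===== CLAIM (what is proved, stated in full; the proofs are below) =====
def Claim_equal_happy_num : Prop := ∀ (start : Int) (end_ : Int), Dom_happy_num start end_ → Spec_happy_num start end_ (happy_num start end_)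

-- ===== LEMMAS AND PROOFS =====

lemma sqsumGo_nonpos (f : Nat) (d s : Int) (h : ¬ 0 < d) : sqsumGo f d s = s := by
  cases f <;> simp [sqsumGo, h]

lemma floordiv10_toNat_lt (d : Int) (h : 0 < d) :
    (PySem.Int.floordiv d 10).toNat < d.toNat := by
  rw [PySem.Int.floordiv_eq_ediv_of_pos (by norm_num)]
  omega

lemma sqsumGo_congr : ∀ (f₁ f₂ : Nat) (d s : Int), d.toNat ≤ f₁ → d.toNat ≤ f₂ →
    sqsumGo f₁ d s = sqsumGo f₂ d s := by
  intro f₁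
  induction f₁ with
  | zero =>
    intro f₂ d s h₁ _
    have hd : ¬ 0 < d := by omega
    rw [sqsumGo_nonpos _ _ _ hd, sqsumGo_nonpos _ _ _ hd]
  | succ f ih =>
    intro f₂ d s h₁ h₂
    by_cases hd : 0 < d
    · obtain ⟨g, rfl⟩ : ∃ g, f₂ = g + 1 := ⟨f₂ - 1, by omega⟩
      simp only [sqsumGo, if_pos hd]
      exact ih g _ _ (by have := floordiv10_toNat_lt d hd; omega)
        (by have := floordiv10_toNat_lt d hd; omega)
    · rw [sqsumGo_nonpos _ _ _ hd, sqsumGo_nonpos _ _ _ hd]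

lemma sqsum_eq (d s : Int) :
    sqsum d s = if 0 < d then sqsum (PySem.Int.floordiv d 10) (s + PySem.Int.mod d 10 ^ 2) else s := by
  by_cases hd : 0 < d
  · rw [if_pos hd]
    unfold sqsum
    obtain ⟨k, hk⟩ : ∃ k, d.toNat = k + 1 := ⟨d.toNat - 1, by omega⟩
    rw [hk]
    simp only [sqsumGo, if_pos hd]
    exact sqsumGo_congr _ _ _ _ (by have := floordiv10_toNat_lt d hd; omega) le_rfl
  · rw [if_neg hd]
    exact sqsumGo_nonpos _ _ _ hd

-- the digit-square-sum step, and happiness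
def step (n : Int) : Int := sqsum n 0

def Happy (n : Int) : Prop := ∃ k : Nat, step^[k] n = 1

lemma step_one : step 1 = 1 := by
  have h10 : (0 : Int) < 10 := by norm_num
  have hf : PySem.Int.floordiv 1 10 = 0 := by
    rw [PySem.Int.floordiv_eq_ediv_of_pos h10]; decide
  have hm : PySem.Int.mod 1 10 = 1 := by
    rw [PySem.Int.mod_eq_emod_of_pos h10]; decide
  unfold step
  rw [sqsum_eq, if_pos (by norm_num), hf, hm, sqsum_eq, if_neg (by norm_num)]
  norm_num

lemma happy_step (n : Int) : Happy (step n) ↔ Happy n := by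
  constructor
  · rintro ⟨k, hk⟩
    exact ⟨k + 1, by rw [Function.iterate_succ_apply]; exact hk⟩
  · rintro ⟨k, hk⟩
    cases k with
    | zero =>
      simp only [Function.iterate_zero, id_eq] at hk
      subst hk
      exact ⟨0, by simpa using step_one⟩
    | succ m =>
      rw [Function.iterate_succ_apply] at hk
      exact ⟨m, hk⟩

lemma happy_iterate (k : Nat) (n : Int) : Happy (step^[k] n) ↔ Happy n := by
  induction k generalizing n with
  | zero => simp
  | succ m ih => rw [Function.iterate_succ_apply, ih, happy_step]

-- a value on a nontrivial cycle other than 1 is not happy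
lemma cycle_unhappy (n : Int) (p : Nat) (hp : 0 < p) (hc : step^[p] n = n) (hn : n ≠ 1) :
    ¬ Happy n := by
  rintro ⟨k, hk⟩
  have hmul : ∀ m : Nat, step^[p * m] n = n := by
    intro m
    induction m with
    | zero => simp
    | succ j ih =>
      have : p * (j + 1) = p * j + p := by ring
      rw [this, Function.iterate_add_apply, hc, ih]
  rcases Nat.eq_zero_or_pos k with hk0 | hkpos
  · subst hk0; simp at hk; exact hn hk
  · have h1 : step^[p * k] n = n := hmul k
    have h2 : p * k = (p * k - k) + k := by
      have : k ≤ p * k := Nat.le_mul_of_pos_left k hp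
      omega
    rw [h2, Function.iterate_add_apply, hk, Function.iterate_fixed step_one] at h1
    exact hn h1.symm

-- bounds: 0 ≤ sqsum, and sqsum d s ≤ s + 81·(digit count)
lemma sqsum_bounds : ∀ (n : Nat) (d s : Int), d < 10 ^ n → 0 ≤ s →
    0 ≤ sqsum d s ∧ sqsum d s ≤ s + 81 * n := by
  intro n
  induction n with
  | zero =>
    intro d s hd hs
    rw [sqsum_eq, if_neg (by simp at hd; omega)]
    constructor
    · exact hs
    · push_cast; omega
  | succ m ih =>
    intro d s hd hs
    rw [sqsum_eq]
    by_cases hdp : 0 < d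
    · rw [if_pos hdp]
      have h10 : (0 : Int) < 10 := by norm_num
      have hm0 : 0 ≤ PySem.Int.mod d 10 := PySem.Int.mod_nonneg d h10
      have hm9 : PySem.Int.mod d 10 < 10 := PySem.Int.mod_lt d h10
      have hmsq : PySem.Int.mod d 10 ^ 2 ≤ 81 := by nlinarith
      have hdiv : PySem.Int.floordiv d 10 < 10 ^ m := by
        rw [PySem.Int.floordiv_eq_ediv_of_pos h10]
        have hP : (0 : Int) < 10 ^ m := by positivity
        have : d < 10 ^ m * 10 := by rw [← pow_succ]; exact hd
        omega
      have := ih (PySem.Int.floordiv d 10) (s + PySem.Int.mod d 10 ^ 2) hdiv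
        (by positivity)
      constructor
      · exact this.1
      · have h2 := this.2
        push_cast at h2 ⊢
        omega
    · rw [if_neg hdp]
      constructor
      · exact hs
      · push_cast; omega

lemma step_bounds (x : Int) (h₁ : -2147483648 ≤ x) (h₂ : x ≤ 2147483648) :
    0 ≤ step x ∧ step x ≤ 810 := by
  have hx : x < 10 ^ 10 := by norm_num; omega
  have := sqsum_bounds 10 x 0 hx le_rfl
  unfold step
  constructor
  · exact this.1
  · have h2 := this.2
    push_cast at h2
    omega

-- the finite universe every chain started in the domain lives in
def U (c0 : Int) : List Int := c0 :: (List.range 811).map (fun i : Nat => (i : Int))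

lemma length_U (c0 : Int) : (U c0).length = 812 := by simp [U]

lemma mem_U_iff (c0 x : Int) : x ∈ U c0 ↔ x = c0 ∨ (0 ≤ x ∧ x ≤ 810) := by
  simp only [U, List.mem_cons, List.mem_map, List.mem_range]
  constructor
  · rintro (h | ⟨i, hi, rfl⟩)
    · exact Or.inl h
    · right; omega
  · rintro (h | h)
    · exact Or.inl h
    · exact Or.inr ⟨x.toNat, by omega, by omega⟩

lemma mem_U_bounds (c0 x : Int) (hc : -2147483648 ≤ c0 ∧ c0 ≤ 2147483648) (hx : x ∈ U c0) :
    -2147483648 ≤ x ∧ x ≤ 2147483648 := by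
  rw [mem_U_iff] at hx
  rcases hx with h | h <;> omega

lemma step_mem_U (c0 x : Int) (hc : -2147483648 ≤ c0 ∧ c0 ≤ 2147483648) (hx : x ∈ U c0) :
    step x ∈ U c0 := by
  have hb := mem_U_bounds c0 x hc hx
  have hs := step_bounds x hb.1 hb.2
  rw [mem_U_iff]
  right
  exact hs

-- a nodup list inside U is short
lemma nodup_length_le (c0 : Int) (l : List Int) (hnd : l.Nodup) (hsub : ∀ x ∈ l, x ∈ U c0) :
    l.length ≤ (U c0).length := by
  classical
  calc l.length = l.toFinset.card := (List.toFinset_card_of_nodup hnd).symm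
  _ ≤ (U c0).toFinset.card := Finset.card_le_card (by
      intro x hx
      simp only [List.mem_toFinset] at hx ⊢
      exact hsub x hx)
  _ ≤ (U c0).length := (U c0).toFinset_card_le

-- 'chain is the trajectory of step from c0, and n is its next value'
def Traj (c0 : Int) (chain : List Int) (n : Int) : Prop :=
  chain = (List.range chain.length).map (fun i => step^[i] c0) ∧ n = step^[chain.length] c0

lemma traj_nil (c0 : Int) : Traj c0 [] c0 := ⟨by simp, by simp⟩

lemma traj_extend (c0 : Int) (chain : List Int) (n : Int) (h : Traj c0 chain n) :
    Traj c0 (chain ++ [n]) (sqsum n 0) := by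
  obtain ⟨hc, hn⟩ := h
  constructor
  · rw [List.length_append, List.length_singleton, List.range_succ, List.map_append, ← hc]
    simp [hn]
  · rw [List.length_append, List.length_singleton, Function.iterate_succ_apply', ← hn]
    rfl

lemma traj_happy (c0 : Int) (chain : List Int) (n : Int) (h : Traj c0 chain n) :
    Happy n ↔ Happy c0 := by
  rw [h.2]; exact happy_iterate _ _

lemma traj_mem_happy (c0 : Int) (chain : List Int) (n m : Int) (h : Traj c0 chain n)
    (hm : m ∈ chain) : Happy m ↔ Happy c0 := by
  rw [h.1] at hm
  simp only [List.mem_map, List.mem_range] at hm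
  obtain ⟨i, _, rfl⟩ := hm
  exact happy_iterate _ _

-- revisiting a chain value means a nontrivial cycle
lemma traj_mem_cycle (c0 : Int) (chain : List Int) (n : Int) (h : Traj c0 chain n)
    (hm : n ∈ chain) : ∃ p : Nat, 0 < p ∧ step^[p] n = n := by
  obtain ⟨hc, hn⟩ := h
  rw [hc] at hm
  simp only [List.mem_map, List.mem_range] at hm
  obtain ⟨j, hj, hjn⟩ := hm
  refine ⟨chain.length - j, by omega, ?_⟩
  rw [← hjn, ← Function.iterate_add_apply]
  rw [show chain.length - j + j = chain.length from by omega, ← hn, hjn]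

-- ===== A's loop =====
lemma loopA_go (c0 : Int) (hc : -2147483648 ≤ c0 ∧ c0 ≤ 2147483648) :
    ∀ (f : Nat) (num : Int) (hist : List Int), Traj c0 hist num → hist.Nodup →
      (∀ x ∈ num :: hist, x ∈ U c0) → (U c0).length + 1 ≤ f + hist.length →
      (loopA f num hist = 1 ↔ Happy c0) := by
  intro f
  induction f with
  | zero =>
    intro num hist _ hnd hsub hfuel
    exfalso
    have := nodup_length_le c0 hist hnd (fun x hx => hsub x (List.mem_cons_of_mem _ hx))
    omega
  | succ f ih =>
    intro num hist ht hnd hsub hfuel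
    have heq : loopA (f + 1) num hist
        = if num ≠ 1 ∧ num ∉ hist then loopA f (sqsum num 0) (hist ++ [num]) else num := rfl
    by_cases hg : num ≠ 1 ∧ num ∉ hist
    · rw [heq, if_pos hg]
      apply ih _ _ (traj_extend c0 hist num ht)
      · simp only [List.nodup_append, List.nodup_singleton, hnd, true_and]
        intro a ha b hb
        simp only [List.mem_singleton] at hb
        subst hb
        intro h
        exact hg.2 (h ▸ ha)
      · intro x hx
        rcases List.mem_cons.mp hx with rfl | hx'
        · exact step_mem_U c0 num hc (hsub num List.mem_cons_self)
        · rcases List.mem_append.mp hx' with h' | h'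
          · exact hsub x (List.mem_cons_of_mem _ h')
          · simp only [List.mem_singleton] at h'
            subst h'
            exact hsub x List.mem_cons_self
      · simp only [List.length_append, List.length_singleton]
        omega
    · rw [heq, if_neg hg]
      by_cases h1 : num = 1
      · subst h1
        simp only [true_iff]
        exact (traj_happy c0 hist 1 ht).mp ⟨0, rfl⟩
      · have hm : num ∈ hist := by by_contra hmem; exact hg ⟨h1, hmem⟩
        obtain ⟨p, hp, hcyc⟩ := traj_mem_cycle c0 hist num ht hm
        have hnh : ¬ Happy num := cycle_unhappy num p hp hcyc h1
        constructor
        · intro he; exact absurd he h1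
        · intro hH; exact absurd ((traj_happy c0 hist num ht).mpr hH) hnh

lemma loopA_correct (c0 : Int) (hc : -2147483648 ≤ c0 ∧ c0 ≤ 2147483648) :
    loopA 1000 c0 [] = 1 ↔ Happy c0 := by
  apply loopA_go c0 hc 1000 c0 [] (traj_nil c0) List.nodup_nil
  · intro x hx
    simp only [List.mem_cons, List.not_mem_nil, or_false] at hx
    subst hx
    rw [mem_U_iff]
    exact Or.inl rfl
  · rw [length_U]; omega

-- ===== B's loop =====
def CacheOK (cache : PySem.Dict Int Bool) : Prop :=
  ∀ (m : Int) (b : Bool), cache.get? m = some b → (b = true ↔ Happy m)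

lemma loopB_go (c0 : Int) (hc : -2147483648 ≤ c0 ∧ c0 ≤ 2147483648)
    (cache : PySem.Dict Int Bool) (hok : CacheOK cache) (h1 : cache.contains 1 = true) :
    ∀ (f : Nat) (n : Int) (seen : PySem.Set Int) (chain : List Int), Traj c0 chain n →
      chain.Nodup → (∀ x : Int, x ∈ seen ↔ x ∈ chain) →
      (∀ x ∈ n :: chain, x ∈ U c0) → (U c0).length + 1 ≤ f + chain.length →
      ((cache.getD (loopB f n cache seen chain).1 false = true ↔ Happy c0) ∧
        ∀ m ∈ (loopB f n cache seen chain).2.2, (Happy m ↔ Happy c0)) := by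
  intro f
  induction f with
  | zero =>
    intro n seen chain _ hnd _ hsub hfuel
    exfalso
    have := nodup_length_le c0 chain hnd (fun x hx => hsub x (List.mem_cons_of_mem _ hx))
    omega
  | succ f ih =>
    intro n seen chain ht hnd hseen hsub hfuel
    have heq : loopB (f + 1) n cache seen chain
        = if cache.contains n = false ∧ PySem.Set.contains seen n = false then
            loopB f (sqsum n 0) cache (PySem.Set.add seen n) (chain ++ [n])
          else (n, seen, chain) := rfl
    by_cases hg : cache.contains n = false ∧ PySem.Set.contains seen n = false
    · rw [heq, if_pos hg]
      have hns : n ∉ chain := by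
        intro hmem
        have : PySem.Set.contains seen n = true := by
          simp only [PySem.Set.contains_iff]
          exact (hseen n).mpr hmem
        rw [hg.2] at this
        exact Bool.noConfusion this
      apply ih _ _ _ (traj_extend c0 chain n ht)
      · simp only [List.nodup_append, List.nodup_singleton, hnd, true_and]
        intro a ha b hb
        simp only [List.mem_singleton] at hb
        subst hb
        intro h
        exact hns (h ▸ ha)
      · intro x
        rw [PySem.Set.mem_add, hseen x]
        simp [List.mem_append]
      · intro x hx
        rcases List.mem_cons.mp hx with rfl | hx'
        · exact step_mem_U c0 n hc (hsub n List.mem_cons_self)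
        · rcases List.mem_append.mp hx' with h' | h'
          · exact hsub x (List.mem_cons_of_mem _ h')
          · simp only [List.mem_singleton] at h'
            subst h'
            exact hsub x List.mem_cons_self
      · simp only [List.length_append, List.length_singleton]
        omega
    · rw [heq, if_neg hg]
      refine ⟨?_, fun m hm => traj_mem_happy c0 chain n m ht hm⟩
      by_cases hcn : cache.contains n = true
      · obtain ⟨b, hb⟩ : ∃ b, cache.get? n = some b := by
          have := PySem.Dict.contains_eq_isSome_get? cache n
          rw [hcn] at this
          exact Option.isSome_iff_exists.mp this.symm
        rw [PySem.Dict.getD_eq_get?_getD, hb]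
        simp only [Option.getD_some]
        exact (hok n b hb).trans (traj_happy c0 chain n ht)
      · have hcn' : cache.contains n = false := by
          cases h : cache.contains n
          · rfl
          · exact absurd h hcn
        have hsn : PySem.Set.contains seen n = true := by
          by_contra h
          exact hg ⟨hcn', by cases h' : PySem.Set.contains seen n;  rfl; exact absurd h' h⟩
        have hmem : n ∈ chain := by
          rw [← hseen n]
          rw [PySem.Set.contains_iff] at hsn
          exact hsn
        have hn1 : n ≠ 1 := by
          intro h
          rw [h] at hcn'
          rw [h1] at hcn'
          exact Bool.noConfusion hcn'
        obtain ⟨p, hp, hcyc⟩ := traj_mem_cycle c0 chain n ht hmem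
        have hnh : ¬ Happy n := cycle_unhappy n p hp hcyc hn1
        rw [PySem.Dict.getD_of_not_contains cache false hcn']
        constructor
        · intro h; exact absurd h Bool.false_ne_true
        · intro hH; exact absurd ((traj_happy c0 chain n ht).mpr hH) hnh

lemma loopB_correct (c0 : Int) (hc : -2147483648 ≤ c0 ∧ c0 ≤ 2147483648)
    (cache : PySem.Dict Int Bool) (hok : CacheOK cache) (h1 : cache.contains 1 = true) :
    (cache.getD (loopB 1000 c0 cache PySem.Set.empty []).1 false = true ↔ Happy c0) ∧
      ∀ m ∈ (loopB 1000 c0 cache PySem.Set.empty []).2.2, (Happy m ↔ Happy c0) := by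
  apply loopB_go c0 hc cache hok h1 1000 c0 PySem.Set.empty [] (traj_nil c0) List.nodup_nil
  · intro x
    simp [PySem.Set.empty]
  · intro x hx
    simp only [List.mem_cons, List.not_mem_nil, or_false] at hx
    subst hx
    rw [mem_U_iff]
    exact Or.inl rfl
  · rw [length_U]; omega

-- the back-fill keeps the cache invariants
lemma cacheOK_foldl (P : Prop) (b : Bool) (hb : b = true ↔ P) :
    ∀ (l : List Int) (cache : PySem.Dict Int Bool), CacheOK cache →
      (∀ m ∈ l, (Happy m ↔ P)) →
      CacheOK (l.foldl (fun c m => c.insert m b) cache) := by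
  intro l
  induction l with
  | nil => intro cache hok _; exact hok
  | cons m t ih =>
    intro cache hok hl
    simp only [List.foldl_cons]
    apply ih
    · intro x bx hx
      rw [PySem.Dict.get?_insert] at hx
      split at hx
      · rename_i hxm
        cases hx
        subst hxm
        exact hb.trans (hl _ List.mem_cons_self).symm
      · exact hok x bx hx
    · intro x hx
      exact hl x (List.mem_cons_of_mem _ hx)

lemma contains_one_foldl (b : Bool) :
    ∀ (l : List Int) (cache : PySem.Dict Int Bool), cache.contains 1 = true →
      (l.foldl (fun c m => c.insert m b) cache).contains 1 = true := by
  intro l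
  induction l with
  | nil => intro cache h; exact h
  | cons m t ih =>
    intro cache h
    simp only [List.foldl_cons]
    apply ih
    rw [PySem.Dict.contains_insert, h]
    simp

-- ===== the outer fold =====
lemma fold_eq : ∀ (l : List Int), (∀ x ∈ l, -2147483648 ≤ x ∧ x ≤ 2147483648) →
    ∀ (cache : PySem.Dict Int Bool) (acc : List Int), CacheOK cache → cache.contains 1 = true →
      l.foldl (fun num_list num => if loopA 1000 num [] = 1 then num_list ++ [num] else num_list) acc =
      (l.foldl (fun (st : PySem.Dict Int Bool × List Int) num =>
        let res := loopB 1000 num st.1 PySem.Set.empty []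
        let happy := st.1.getD res.1 false
        let cache := res.2.2.foldl (fun c m => c.insert m happy) st.1
        (cache, if happy then st.2 ++ [num] else st.2)) (cache, acc)).2 := by
  intro l
  induction l with
  | nil => intro _ cache acc _ _; rfl
  | cons num t ih =>
    intro hl cache acc hok h1
    have hx := hl num List.mem_cons_self
    have hA := loopA_correct num ⟨hx.1, hx.2⟩
    have hB := loopB_correct num ⟨hx.1, hx.2⟩ cache hok h1
    simp only [List.foldl_cons]
    have hcond : (loopA 1000 num [] = 1)
        ↔ (cache.getD (loopB 1000 num cache PySem.Set.empty []).1 false = true) :=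
      hA.trans hB.1.symm
    have hacc : (if loopA 1000 num [] = 1 then acc ++ [num] else acc)
        = (if cache.getD (loopB 1000 num cache PySem.Set.empty []).1 false then acc ++ [num] else acc) := by
      by_cases h : loopA 1000 num [] = 1
      · rw [if_pos h, if_pos (hcond.mp h)]
      · rw [if_neg h, if_neg (fun hh => h (hcond.mpr hh))]
    rw [hacc]
    exact ih (fun x hx' => hl x (List.mem_cons_of_mem _ hx')) _ _
      (cacheOK_foldl (Happy num) _ hB.1 _ cache hok hB.2)
      (contains_one_foldl _ _ cache h1)

-- ===== VERDICT (by name: the statement is the Claim_ definition above) =====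
theorem happy_num_spec : Claim_equal_happy_num := by
  intro start end_ hdom
  unfold Spec_happy_num happy_num happy_num_alt
  apply fold_eq
  · intro x hx
    rw [PySem.List.mem_pyRange_one] at hx
    simp only [Dom_happy_num, pvDomInt, Bool.and_eq_true, decide_eq_true_eq] at hdom
    omega
  · intro m b hb
    rw [PySem.Dict.get?_insert] at hb
    split at hb
    · cases hb
      subst_vars
      simp only [true_iff]
      exact ⟨0, rfl⟩
    · simp [PySem.Dict.get?_empty] at hb
  · exact PySem.Dict.contains_insert_self _ _ _
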